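-- pv_equiv track=rewrite | github.com/SudaisX/pfun | assignment4/q5.py | partition_modulo_n
-- ===== SOURCE A (Python) =====
-- def partition_modulo_n(n, t):
--     negative = False
--     if n < 0:
--         negative = True
--         n = -n
--
--     remainders = [[i for i in t if i % n == j] for j in range(n)]
--
--     if negative == True:
--         return {-i:remainders[-i] for i in range(n)}
--     else:
--         return {i:remainders[i] for i in range(n)}
-- ===== SOURCE B (Python) =====
-- def partition_modulo_n(n, t):
--     # One pass: bucket each element by its nonnegative residue mod |n|,
--     # then relabel keys in A's order (0..n-1 for n>0; 0,-1,..,n+1 for n<0).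
--     if n == 0:
--         return {}
--     m = abs(n)
--     buckets = [[] for _ in range(m)]
--     for x in t:
--         buckets[x % m].append(x)
--     return {k: buckets[k % m] for k in range(0, n, 1 if n > 0 else -1)}
-- ===== Notes on version B (the rewrite author's own statement) =====
-- stated objective: faster
-- what changed: A scans the whole list once per residue class (|n| filters plus a dict comprehension re-indexing the list of lists); B returns {} for n == 0 and otherwise buckets every element by its nonnegative residue mod |n| in a single pass into an array of buckets, then relabels the keys k -> buckets[k % |n|] in the same order.
import Mathlib
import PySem

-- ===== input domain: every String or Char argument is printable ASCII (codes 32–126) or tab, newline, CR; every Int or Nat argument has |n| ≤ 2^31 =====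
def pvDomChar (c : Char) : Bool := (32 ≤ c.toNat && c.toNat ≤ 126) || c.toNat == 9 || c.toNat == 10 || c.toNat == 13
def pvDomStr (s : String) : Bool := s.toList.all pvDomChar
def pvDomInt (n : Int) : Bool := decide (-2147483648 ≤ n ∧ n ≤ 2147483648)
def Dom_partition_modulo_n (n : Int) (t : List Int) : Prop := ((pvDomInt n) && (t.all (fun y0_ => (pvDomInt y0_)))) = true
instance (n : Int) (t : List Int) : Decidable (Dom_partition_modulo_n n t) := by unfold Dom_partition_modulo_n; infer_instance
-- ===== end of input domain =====

-- B replaces A's per-residue-class scans of t by a single bucketing pass into an array of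
-- buckets indexed by the nonnegative residue mod |n|, then relabels the keys in A's order.


-- ===== PORT A =====
-- literal port of A: one filter of t per residue j in range(|n|), then a dict comprehension
-- re-indexing that list (a negative Python index when n is negative). The keys of the
-- comprehension are distinct, so the dict is the association list in iteration order;
-- remainders[i] / remainders[-i] is never out of range here, so pyGetD with default [] is exact.
def partition_modulo_n (n : Int) (t : List Int) : List (Int × List Int) :=
  let negative : Bool := decide (n < 0)
  let m : Int := if n < 0 then -n else n
  let remainders : List (List Int) :=
    (PySem.List.pyRange 0 m 1).map (fun j => t.filter (fun i => PySem.Int.mod i m == j))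
  if negative = true then
    (PySem.List.pyRange 0 m 1).map (fun i => (-i, PySem.List.pyGetD remainders (-i) []))
  else
    (PySem.List.pyRange 0 m 1).map (fun i => (i, PySem.List.pyGetD remainders i []))

-- ===== PORT B =====
-- port of Source B: early return {} for n == 0; otherwise one bucketing pass over t into a list
-- of m = |n| buckets (buckets[x % m].append(x): the index is always in range, so List.set /
-- getD at a nonnegative in-range index is exact), then the keys range(0, n, ±1) each paired
-- with buckets[k % m].
def partition_modulo_n_alt (n : Int) (t : List Int) : List (Int × List Int) :=
  if n = 0 then []
  else
    let m : Int := if n < 0 then -n else n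
    let buckets : List (List Int) :=
      t.foldl (fun bs x =>
          bs.set (PySem.Int.mod x m).toNat (bs.getD (PySem.Int.mod x m).toNat [] ++ [x]))
        (List.replicate m.toNat [])
    (PySem.List.pyRange 0 n (if n > 0 then 1 else -1)).map
      (fun k => (k, buckets.getD (PySem.Int.mod k m).toNat []))

-- ===== PRECONDITION & SPEC =====
def Spec_partition_modulo_n (n : Int) (t : List Int) (out : List (Int × List Int)) : Prop := out = partition_modulo_n_alt n t
instance (n : Int) (t : List Int) (out : List (Int × List Int)) : Decidable (Spec_partition_modulo_n n t out) := by unfold Spec_partition_modulo_n; infer_instance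

-- ===== CLAIM (what is proved, stated in full; the proofs are below) =====
def Claim_equal_partition_modulo_n : Prop := ∀ (n : Int) (t : List Int), Dom_partition_modulo_n n t → Spec_partition_modulo_n n t (partition_modulo_n n t)

-- ===== LEMMAS AND PROOFS =====
-- the bucketing fold: bucket j ends up holding exactly the elements of t with residue j
lemma bucket_getD (m : Int) (hm : 0 < m) :
    ∀ (t : List Int) (bs : List (List Int)), bs.length = m.toNat →
      ∀ j : Nat, j < m.toNat →
      (t.foldl (fun bs x =>
          bs.set (PySem.Int.mod x m).toNat (bs.getD (PySem.Int.mod x m).toNat [] ++ [x])) bs).getD j []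
        = bs.getD j [] ++ t.filter (fun x => PySem.Int.mod x m == (j : Int)) := by
  intro t
  induction t with
  | nil => intro bs _ j _; simp
  | cons x t ih =>
    intro bs hlen j hj
    have hi0 : 0 ≤ PySem.Int.mod x m := PySem.Int.mod_nonneg x hm
    have hilt : PySem.Int.mod x m < m := PySem.Int.mod_lt x hm
    have hiL : (PySem.Int.mod x m).toNat < bs.length := by omega
    simp only [List.foldl_cons]
    rw [ih _ (by simp [hlen]) j hj]
    by_cases hij : (PySem.Int.mod x m).toNat = j
    · subst hij
      simp [List.getD, List.getElem?_set_self hiL, hi0]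
    · have hmod : (PySem.Int.mod x m == (j : Int)) = false := by
        simp only [beq_eq_false_iff_ne, ne_eq]; omega
      simp [List.getD, hij, hmod]

lemma neg_emod_eq (x m : Int) (hm : 0 < m) :
    (-x) % m = (if x % m = 0 then 0 else m - x % m) := by
  have h1 : -x = -(x % m) + m * (-(x / m)) := by
    have := Int.emod_add_mul_ediv x m; linarith
  rw [h1, Int.add_mul_emod_self_left]
  rcases eq_or_ne (x % m) 0 with h0 | h0
  · simp [h0]
  · have hlt : x % m < m := Int.emod_lt_of_pos x hm
    have hge : 0 ≤ x % m := Int.emod_nonneg x (by omega)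
    rw [if_neg h0]
    have h2 : (-(x % m)) % m = (-(x % m) + m * 1) % m := (Int.add_mul_emod_self_left ..).symm
    rw [h2, Int.emod_eq_of_lt (by omega) (by omega)]
    ring

-- Python's negative index remainders[-k]
lemma pyGetD_map_pyRange_neg {β : Type} (f : Int → β) (n k : Nat) (d : β) (hk : k < n) :
    PySem.List.pyGetD (List.map f (PySem.List.pyRange 0 (n : Int))) (-(k : Int)) d
      = f (if k = 0 then 0 else (n : Int) - k) := by
  rcases Nat.eq_zero_or_pos k with h0 | h0
  · subst h0
    simpa using PySem.List.pyGetD_map_pyRange f n 0 d hk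
  · have hlen : (List.map f (PySem.List.pyRange 0 (n : Int))).length = n := by
      simp [PySem.List.length_pyRange_one]
    simp only [PySem.List.pyGetD, PySem.List.pyGet?, PySem.List.pyIdx?, hlen]
    rw [if_neg (by omega), if_pos (by omega)]
    simp only [neg_neg, Int.toNat_natCast, Option.bind_some]
    rw [List.getElem?_map, PySem.List.getElem?_pyRange_one, if_pos (by omega)]
    simp only [Option.map_some, Option.getD_some, zero_add]
    congr 1
    rw [if_neg (by omega)]
    omega

-- range(0, n, -1) for n < 0 enumerates the negations of range(0, -n)
lemma pyRange_countdown (n : Int) :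
    PySem.List.pyRange 0 n (-1) = (PySem.List.pyRange 0 (-n) 1).map (fun i => -i) := by
  rw [PySem.List.pyRange_neg_one, PySem.List.pyRange_one, List.map_map]
  have : (0 - n).toNat = (-n - 0).toNat := by omega
  rw [this]
  apply List.map_congr_left
  intro k _
  simp [Function.comp]

theorem pmn_main (n : Int) (t : List Int) :
    partition_modulo_n n t = partition_modulo_n_alt n t := by
  rcases lt_trichotomy n 0 with hn | hn | hn
  · -- negative n
    have hm : (0:Int) < -n := by omega
    simp only [partition_modulo_n, partition_modulo_n_alt, if_pos hn,
      if_neg (by omega : ¬ n = 0), decide_eq_true_eq, if_neg (by omega : ¬ n > 0)]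
    rw [pyRange_countdown n, List.map_map]
    apply List.map_congr_left
    intro i hi
    obtain ⟨hi0, hilt⟩ := PySem.List.mem_pyRange_one.mp hi
    simp only [Function.comp]
    refine congrArg (fun l => ((-i, l) : Int × List Int)) ?_
    -- A's side: the negative Python index
    rw [show i = ((i.toNat : Nat) : Int) from by omega,
        show (-n : Int) = (((-n).toNat : Nat) : Int) from by omega]
    rw [pyGetD_map_pyRange_neg _ (-n).toNat i.toNat [] (by omega)]
    rw [show ((((-n).toNat : Nat) : Int)) = -n from by omega]
    -- B's side: the bucketing fold
    have hr0 : 0 ≤ PySem.Int.mod (-((i.toNat : Nat) : Int)) (-n) := PySem.Int.mod_nonneg _ hm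
    have hrlt : PySem.Int.mod (-((i.toNat : Nat) : Int)) (-n) < -n := PySem.Int.mod_lt _ hm
    rw [bucket_getD (-n) hm t _ (by simp) _ (by omega)]
    rw [List.getD_replicate ([] : List Int) (by omega), List.nil_append]
    apply List.filter_congr
    intro x _
    -- residue of the key: (-i) % (-n)⁺ = if i = 0 then 0 else -n - i
    have hkey : ((PySem.Int.mod (-((i.toNat : Nat) : Int)) (-n)).toNat : Int)
        = (if i.toNat = 0 then 0 else (-n : Int) - ((i.toNat : Nat) : Int)) := by
      rw [show ((PySem.Int.mod (-((i.toNat : Nat) : Int)) (-n)).toNat : Int)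
            = PySem.Int.mod (-((i.toNat : Nat) : Int)) (-n) from by omega]
      rw [PySem.Int.mod_eq_emod_of_pos hm, neg_emod_eq _ _ hm,
          Int.emod_eq_of_lt (by omega) (by omega)]
      split_ifs with h1 h2 h2 <;> first | rfl | omega
    rw [hkey]
  · -- n = 0: A iterates an empty range, B returns [] directly
    subst hn
    simp [partition_modulo_n, partition_modulo_n_alt, PySem.List.pyRange_one_eq_nil]
  · -- positive n
    simp only [partition_modulo_n, partition_modulo_n_alt,
      if_neg (by omega : ¬ n < 0), if_neg (by omega : ¬ n = 0),
      decide_eq_true_eq, if_pos hn]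
    apply List.map_congr_left
    intro i hi
    obtain ⟨hi0, hilt⟩ := PySem.List.mem_pyRange_one.mp hi
    refine congrArg (fun l => ((i, l) : Int × List Int)) ?_
    rw [PySem.List.pyGetD_map_pyRange_of_nonneg _ _ _ _ hi0 hilt]
    have hkey : PySem.Int.mod i n = i := by
      rw [PySem.Int.mod_eq_emod_of_pos hn, Int.emod_eq_of_lt hi0 hilt]
    rw [bucket_getD n hn t _ (by simp) _ (by omega),
        List.getD_replicate ([] : List Int) (by omega), List.nil_append]
    apply List.filter_congr
    intro x _
    rw [show ((PySem.Int.mod i n).toNat : Int) = i from by rw [hkey]; omega]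

-- ===== VERDICT (by name: the statement is the Claim_ definition above) =====
theorem partition_modulo_n_spec : Claim_equal_partition_modulo_n := by
  intro n t _
  unfold Spec_partition_modulo_n
  exact pmn_main n t
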